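-- pv_equiv track=rewrite | github.com/kjskjs356/ALGORITHMS_PRACTICE | 백준/Gold/13460. 구슬 탈출 2/구슬 탈출 2.py | target_move
-- ===== SOURCE A (Python) =====
-- def target_move(arr, x, y, n):
--     if arr[x][y] == '.':
--         return x, y
--     s_x, s_y = x, y
--     while True:
--         nx = x + dx[n]
--         ny = y + dy[n]
--         if arr[nx][ny] == '.':
--             x, y = nx, ny
--         elif arr[nx][ny] == 'O':
--             arr[s_x][s_y] = '.'
--             x, y = nx, ny
--             break
--         else:
--             arr[x][y], arr[s_x][s_y] = arr[s_x][s_y], arr[x][y]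
--             break
--     return x, y
--
-- dx = [1, -1, 0, 0]
--
-- dy = [0, 0, 1, -1]
-- ===== SOURCE B (Python) =====
-- dx = [1, -1, 0, 0]
--
-- dy = [0, 0, 1, -1]
--
--
-- def target_move(arr, x, y, n):
--     if arr[x][y] == '.':
--         return x, y
--     dxn, dyn = dx[n], dy[n]
--     if dxn != 0:
--         rows = arr[x + 1:] if dxn == 1 else arr[:x][::-1]
--         ray = []
--         for row in rows:
--             if y >= len(row):
--                 break
--             ray.append(row[y])
--     else:
--         row = arr[x]
--         ray = row[y + 1:] if dyn == 1 else row[:y][::-1]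
--     free = [k for k, c in enumerate(ray) if c != '.'][0]
--     if ray[free] == 'O':
--         arr[x][y] = '.'
--         return x + (free + 1) * dxn, y + (free + 1) * dyn
--     lx, ly = x + free * dxn, y + free * dyn
--     arr[lx][ly], arr[x][y] = arr[x][y], arr[lx][ly]
--     return lx, ly
-- ===== Notes on version B (the rewrite author's own statement) =====
-- stated objective: alternative
-- what changed: Instead of sliding the marble cell by cell, B extracts the whole ray of cells ahead of the marble (slices for horizontal, a row scan for vertical), finds the first non-'.' index with enumerate, and computes the final coordinates arithmetically from that index.
-- outside the precondition, e.g. on target_move([['x_x', 'O'], ['.', 'x_x']], 1, 1, -1): A returns (1, 0), B raises IndexError; on target_move([['R'], ['#']], -2, 0, 0): A returns (-2, 0), B returns (-2, 0)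
import Mathlib
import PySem

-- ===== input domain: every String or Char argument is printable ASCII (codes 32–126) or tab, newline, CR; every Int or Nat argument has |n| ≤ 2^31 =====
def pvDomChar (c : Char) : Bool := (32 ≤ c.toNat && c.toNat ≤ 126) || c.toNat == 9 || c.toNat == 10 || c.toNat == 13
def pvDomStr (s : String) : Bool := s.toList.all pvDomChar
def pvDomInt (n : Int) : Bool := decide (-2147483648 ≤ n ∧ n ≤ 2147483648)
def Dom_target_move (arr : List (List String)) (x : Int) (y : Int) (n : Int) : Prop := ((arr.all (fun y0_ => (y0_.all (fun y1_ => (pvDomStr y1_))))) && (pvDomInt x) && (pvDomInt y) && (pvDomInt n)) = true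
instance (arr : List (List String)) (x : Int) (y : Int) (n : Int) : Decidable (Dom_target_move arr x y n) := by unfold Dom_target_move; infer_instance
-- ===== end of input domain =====

-- B does not slide step by step: it extracts the whole ray of cells ahead of the
-- marble (slices / a row scan), locates the first non-'.' entry with enumerate,
-- and computes the final coordinates arithmetically from that index (objective:
-- alternative). A (and B) mutate arr in place on the hole/wall branches; the
-- equivalence proved here is about the RETURN value only (Source B performs the
-- same mutations).

-- ===== PORT A =====
-- arr[i][j] as Python computes it (negative indices wrap; none = IndexError)
def pvCell (arr : List (List String)) (i j : Int) : Option String :=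
  match PySem.List.pyGet? arr i with
  | some row => PySem.List.pyGet? row j
  | none => none

-- totality fuel for A's rolling loop; inside Pre_ the walk stops well before it runs out
def pvFuel (arr : List (List String)) : Nat :=
  arr.length + arr.foldr (fun r m => max r.length m) 0 + 1

-- A's `while True` loop, step for step: move through '.', stop at 'O' (advance) or anything else (stay)
def pvLoopA (arr : List (List String)) (dxn dyn : Int) : Nat → Int → Int → Int × Int
  | 0, x, y => (x, y)
  | f + 1, x, y =>
    match pvCell arr (x + dxn) (y + dyn) with
    | some s =>
        if s = "." then pvLoopA arr dxn dyn f (x + dxn) (y + dyn)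
        else if s = "O" then (x + dxn, y + dyn)
        else (x, y)
    | none => (x, y)  -- Python raises IndexError here; excluded by Pre_

def target_move (arr : List (List String)) (x : Int) (y : Int) (n : Int) : Int × Int :=
  if pvCell arr x y = some "." then (x, y)
  else
    let dxn := (PySem.List.pyGet? [(1 : Int), -1, 0, 0] n).getD 0
    let dyn := (PySem.List.pyGet? [(0 : Int), 0, 1, -1] n).getD 0
    pvLoopA arr dxn dyn (pvFuel arr) x y

-- ===== PORT B =====
-- B's vertical ray scan: `for row in rows: if y >= len(row): break; ray.append(row[y])`
def pvRayV (y : Int) : List (List String) → List String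
  | [] => []
  | row :: rest =>
    if (row.length : Int) ≤ y then []
    else (PySem.List.pyGet? row y).getD "" :: pvRayV y rest

-- B's ray of cells ahead of the marble, as a function of the direction deltas
-- ([::-1] is reversal: PySem.List.slice?_none_none_neg_one)
def pvRayOf (arr : List (List String)) (x y dxn dyn : Int) : List String :=
  if dxn ≠ 0 then
    pvRayV y (if dxn = 1 then PySem.List.slice arr (some (x + 1)) none
              else (PySem.List.slice arr none (some x)).reverse)
  else
    let row := (PySem.List.pyGet? arr x).getD []
    if dyn = 1 then PySem.List.slice row (some (y + 1)) none
    else (PySem.List.slice row none (some y)).reverse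

-- B's body after the dot guard: first non-'.' index of the ray, then arithmetic
def pvAltBody (arr : List (List String)) (x y dxn dyn : Int) : Int × Int :=
  let ray := pvRayOf arr x y dxn dyn
  let free : Int :=
    (((PySem.List.enumerate ray 0).filter (fun p => p.2 ≠ ".")).head?.map Prod.fst).getD 0
  if PySem.List.pyGet? ray free = some "O" then (x + (free + 1) * dxn, y + (free + 1) * dyn)
  else (x + free * dxn, y + free * dyn)

def target_move_alt (arr : List (List String)) (x : Int) (y : Int) (n : Int) : Int × Int :=
  if pvCell arr x y = some "." then (x, y)
  else
    pvAltBody arr x y ((PySem.List.pyGet? [(1 : Int), -1, 0, 0] n).getD 0)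
      ((PySem.List.pyGet? [(0 : Int), 0, 1, -1] n).getD 0)

-- ===== PRECONDITION & SPEC =====
def pvRow (arr : List (List String)) (i : Nat) : List String := (arr[i]?).getD []
def pvCellAt (arr : List (List String)) (i j : Nat) : String := ((pvRow arr i)[j]?).getD ""

-- a first blocking cell ahead of (x,y) in direction n: all cells strictly before it
-- are '.', every lookup on the way is in range (a Python index n of -4..-1 wraps to
-- the same direction as n+4)
def pvFirstBlock (arr : List (List String)) (x y : Nat) (n : Int) : Prop :=
  if n = 0 ∨ n = -4 then
    ∃ d, x + 1 + d < arr.length ∧ (∀ j ≤ d, y < (pvRow arr (x + 1 + j)).length) ∧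
      (∀ j < d, pvCellAt arr (x + 1 + j) y = ".") ∧ pvCellAt arr (x + 1 + d) y ≠ "."
  else if n = 1 ∨ n = -3 then
    ∃ d < x, (∀ j ≤ d, y < (pvRow arr (x - 1 - j)).length) ∧
      (∀ j < d, pvCellAt arr (x - 1 - j) y = ".") ∧ pvCellAt arr (x - 1 - d) y ≠ "."
  else if n = 2 ∨ n = -2 then
    ∃ d, y + 1 + d < (pvRow arr x).length ∧
      (∀ j < d, pvCellAt arr x (y + 1 + j) = ".") ∧ pvCellAt arr x (y + 1 + d) ≠ "."
  else
    ∃ d < y, (∀ j < d, pvCellAt arr x (y - 1 - j) = ".") ∧ pvCellAt arr x (y - 1 - d) ≠ "."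

-- Pre_ restricts to the natural domain: either the start cell (Python indexing) is '.'
-- (immediate return), or the coordinates are in range and non-negative, -4 <= n < 4,
-- and a blocking cell is reachable ahead in direction n with everything on the way in
-- range; outside it A raises IndexError, or the roll started at / was stopped only by a
-- negative-index wraparound cell (an accident of Python indexing).
def Pre_target_move (arr : List (List String)) (x : Int) (y : Int) (n : Int) : Prop :=
  pvCell arr x y = some "." ∨
  (0 ≤ x ∧ x < (arr.length : Int) ∧ 0 ≤ y ∧ y < ((pvRow arr x.toNat).length : Int) ∧
   -4 ≤ n ∧ n < 4 ∧ pvFirstBlock arr x.toNat y.toNat n)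

-- the unbounded ∃ in the first and third branch are bounded in fact; decide via explicit bounds
def pvFirstBlockDec (arr : List (List String)) (x y : Nat) (n : Int) : Decidable (pvFirstBlock arr x y n) := by
  unfold pvFirstBlock
  split_ifs
  · refine decidable_of_iff (∃ d < arr.length, x + 1 + d < arr.length ∧ (∀ j ≤ d, y < (pvRow arr (x + 1 + j)).length) ∧
      (∀ j < d, pvCellAt arr (x + 1 + j) y = ".") ∧ pvCellAt arr (x + 1 + d) y ≠ ".") ?_
    constructor
    · rintro ⟨d, _, h⟩; exact ⟨d, h⟩
    · rintro ⟨d, h⟩; exact ⟨d, by omega, h⟩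
  · infer_instance
  · refine decidable_of_iff (∃ d < (pvRow arr x).length, y + 1 + d < (pvRow arr x).length ∧
      (∀ j < d, pvCellAt arr x (y + 1 + j) = ".") ∧ pvCellAt arr x (y + 1 + d) ≠ ".") ?_
    constructor
    · rintro ⟨d, _, h⟩; exact ⟨d, h⟩
    · rintro ⟨d, h⟩; exact ⟨d, by omega, h⟩
  · infer_instance

instance (arr : List (List String)) (x : Int) (y : Int) (n : Int) : Decidable (Pre_target_move arr x y n) := by
  unfold Pre_target_move
  haveI := pvFirstBlockDec arr x.toNat y.toNat n
  infer_instance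

def pvWitness_target_move : List (List String) × Int × Int × Int :=
  ([["#", "#", "#"], ["#", "R", "."], ["#", "#", "#"]], 1, 1, 0)

def Spec_target_move (arr : List (List String)) (x : Int) (y : Int) (n : Int) (out : Int × Int) : Prop := out = target_move_alt arr x y n
instance (arr : List (List String)) (x : Int) (y : Int) (n : Int) (out : Int × Int) : Decidable (Spec_target_move arr x y n out) := by unfold Spec_target_move; infer_instance

-- ===== CLAIM (what is proved, stated in full; the proofs are below) =====
def Claim_equal_target_move : Prop := ∀ (arr : List (List String)) (x : Int) (y : Int) (n : Int), Dom_target_move arr x y n → Pre_target_move arr x y n → Spec_target_move arr x y n (target_move arr x y n)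

-- ===== LEMMAS AND PROOFS =====

lemma pvCell_natCast (arr : List (List String)) (i j : Nat)
    (hi : i < arr.length) (hj : j < (pvRow arr i).length) :
    pvCell arr (i : Int) (j : Int) = some (pvCellAt arr i j) := by
  have hrow : arr[i]? = some (pvRow arr i) := by simp [pvRow, List.getElem?_eq_getElem hi]
  unfold pvCell
  rw [PySem.List.pyGet?_natCast, hrow]
  show PySem.List.pyGet? (pvRow arr i) (j : Int) = some (pvCellAt arr i j)
  rw [PySem.List.pyGet?_natCast, List.getElem?_eq_getElem hj]
  simp [pvCellAt, List.getElem?_eq_getElem hj]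

lemma rowLen_le_fold (arr : List (List String)) :
    ∀ i, i < arr.length → (pvRow arr i).length ≤ arr.foldr (fun r m => max r.length m) 0 := by
  induction arr with
  | nil => intro i h; exact absurd h (by simp)
  | cons r rs ih =>
    intro i h
    cases i with
    | zero => simp [pvRow, List.foldr]
    | succ i =>
      have := ih i (by simpa using h)
      simp only [pvRow, List.getElem?_cons_succ, List.foldr] at *
      omega

-- A's loop, run against a first blocker at distance d: d '.'-steps then stop at b
lemma pvLoopA_blocked (arr : List (List String)) (dxn dyn : Int) (b : String) (hb : b ≠ ".") :
    ∀ (d : Nat) (x y : Int) (f : Nat), d < f →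
      (∀ j : Nat, j < d → pvCell arr (x + ((j : Int) + 1) * dxn) (y + ((j : Int) + 1) * dyn) = some ".") →
      pvCell arr (x + ((d : Int) + 1) * dxn) (y + ((d : Int) + 1) * dyn) = some b →
      pvLoopA arr dxn dyn f x y =
        if b = "O" then (x + ((d : Int) + 1) * dxn, y + ((d : Int) + 1) * dyn)
        else (x + (d : Int) * dxn, y + (d : Int) * dyn) := by
  intro d
  induction d with
  | zero =>
    intro x y f hf hd hk
    obtain ⟨f', rfl⟩ : ∃ f', f = f' + 1 := ⟨f - 1, by omega⟩
    have ex : x + (((0 : Nat) : Int) + 1) * dxn = x + dxn := by push_cast; ring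
    have ey : y + (((0 : Nat) : Int) + 1) * dyn = y + dyn := by push_cast; ring
    rw [ex, ey] at hk
    show pvLoopA arr dxn dyn (f' + 1) x y = _
    rw [pvLoopA, hk]
    by_cases ho : b = "O" <;> simp [hb, ho]
  | succ d ih =>
    intro x y f hf hd hk
    obtain ⟨f', rfl⟩ : ∃ f', f = f' + 1 := ⟨f - 1, by omega⟩
    have hd0 : pvCell arr (x + dxn) (y + dyn) = some "." := by
      have := hd 0 (by omega)
      have ex : x + (((0 : Nat) : Int) + 1) * dxn = x + dxn := by push_cast; ring
      have ey : y + (((0 : Nat) : Int) + 1) * dyn = y + dyn := by push_cast; ring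
      rwa [ex, ey] at this
    have hstep : pvLoopA arr dxn dyn (f' + 1) x y = pvLoopA arr dxn dyn f' (x + dxn) (y + dyn) := by
      rw [pvLoopA, hd0]; simp
    rw [hstep]
    have hrec := ih (x + dxn) (y + dyn) f' (by omega)
      (fun j hj => by
        have := hd (j + 1) (by omega)
        have ex : x + (((j + 1 : Nat) : Int) + 1) * dxn = (x + dxn) + ((j : Int) + 1) * dxn := by push_cast; ring
        have ey : y + (((j + 1 : Nat) : Int) + 1) * dyn = (y + dyn) + ((j : Int) + 1) * dyn := by push_cast; ring
        rwa [ex, ey] at this)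
      (by
        have ex : x + (((d + 1 : Nat) : Int) + 1) * dxn = (x + dxn) + ((d : Int) + 1) * dxn := by push_cast; ring
        have ey : y + (((d + 1 : Nat) : Int) + 1) * dyn = (y + dyn) + ((d : Int) + 1) * dyn := by push_cast; ring
        rwa [ex, ey] at hk)
    rw [hrec]
    split_ifs <;> simp only [Prod.mk.injEq] <;> constructor <;> push_cast <;> ring

-- first element of the enumerate-filter pass, when the first non-'.' is at index d
lemma first_blocker (b : String) (hb : b ≠ ".") :
    ∀ (r : List String) (d : Nat) (s : Int),
      (∀ j, j < d → r[j]? = some ".") → r[d]? = some b →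
      ((PySem.List.enumerate r s).filter (fun p => p.2 ≠ ".")).head? = some (s + (d : Int), b) := by
  intro r
  induction r with
  | nil => intro d s _ hk; simp at hk
  | cons c r ih =>
    intro d s hd hk
    rw [PySem.List.enumerate_cons, List.filter_cons]
    cases d with
    | zero =>
      have hc : c = b := by simpa using hk
      subst hc
      simp [hb]
    | succ d =>
      have hc : c = "." := by have := hd 0 (by omega); simpa using this
      subst hc
      rw [if_neg (by simp)]
      rw [ih d (s + 1)
        (fun j hj => by have := hd (j + 1) (by omega); simpa using this)
        (by simpa using hk)]
      simp only [Option.some.injEq, Prod.mk.injEq]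
      refine ⟨?_, by simp⟩
      push_cast; ring

-- the vertical ray scan reads exactly column y of its row list
lemma pvRayV_get (y : Nat) :
    ∀ (L : List (List String)) (j : Nat),
      (∀ i, i ≤ j → y < (pvRow L i).length) → j < L.length →
      (pvRayV (y : Int) L)[j]? = some (pvCellAt L j y) := by
  intro L
  induction L with
  | nil => intro j _ h; simp at h
  | cons row rest ih =>
    intro j hcol hj
    have h0 : y < row.length := by have := hcol 0 (by omega); simpa [pvRow] using this
    show (pvRayV (y : Int) (row :: rest))[j]? = _
    rw [pvRayV, if_neg (by exact_mod_cast not_le.mpr h0)]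
    cases j with
    | zero =>
      simp [pvCellAt, pvRow, PySem.List.pyGet?_natCast, List.getElem?_eq_getElem h0]
    | succ j =>
      simp only [List.getElem?_cons_succ]
      rw [ih j (fun i hi => by have := hcol (i + 1) (by omega); simpa [pvRow] using this)
        (by simpa using hj)]
      simp [pvCellAt, pvRow]

-- B's body, evaluated against a first blocker at ray index d
lemma pvAltBody_eval (arr : List (List String)) (x y dxn dyn : Int) (d : Nat) (b : String)
    (hb : b ≠ ".")
    (hd : ∀ j, j < d → (pvRayOf arr x y dxn dyn)[j]? = some ".")
    (hk : (pvRayOf arr x y dxn dyn)[d]? = some b) :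
    pvAltBody arr x y dxn dyn =
      if b = "O" then (x + ((d : Int) + 1) * dxn, y + ((d : Int) + 1) * dyn)
      else (x + (d : Int) * dxn, y + (d : Int) * dyn) := by
  unfold pvAltBody
  have hhead := first_blocker b hb (pvRayOf arr x y dxn dyn) d 0 hd hk
  simp only [hhead, Option.map_some, Option.getD_some]
  have hfree : (0 : Int) + (d : Int) = ((d : Nat) : Int) := by ring
  have hget : PySem.List.pyGet? (pvRayOf arr x y dxn dyn) ((0 : Int) + (d : Int)) = some b := by
    rw [hfree, PySem.List.pyGet?_natCast]; exact hk
  rw [hget]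
  simp only [Option.some.injEq]
  split_ifs <;> simp only [Prod.mk.injEq] <;> constructor <;> ring_nf

lemma pvRow_drop (arr : List (List String)) (m i : Nat) :
    pvRow (arr.drop m) i = pvRow arr (m + i) := by
  simp [pvRow, List.getElem?_drop]

lemma pvRow_take_rev (arr : List (List String)) (m i : Nat) (hi : i < m) (hm : m ≤ arr.length) :
    pvRow ((arr.take m).reverse) i = pvRow arr (m - 1 - i) := by
  have hlen : (arr.take m).length = m := by simp [hm]
  have h1 : ((arr.take m).reverse)[i]? = (arr.take m)[m - 1 - i]? := by
    rw [List.getElem?_reverse (by omega : i < (arr.take m).length)]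
    congr 1; omega
  rw [pvRow, h1, List.getElem?_take_of_lt (by omega), pvRow]

lemma pvCellAt_drop (arr : List (List String)) (m i y : Nat) :
    pvCellAt (arr.drop m) i y = pvCellAt arr (m + i) y := by
  simp [pvCellAt, pvRow_drop]

lemma pvCellAt_take_rev (arr : List (List String)) (m i y : Nat) (hi : i < m) (hm : m ≤ arr.length) :
    pvCellAt ((arr.take m).reverse) i y = pvCellAt arr (m - 1 - i) y := by
  simp [pvCellAt, pvRow_take_rev arr m i hi hm]

-- direction down (dx 1, dy 0)
lemma dir_down (arr : List (List String)) (x y : Int) (hx0 : 0 ≤ x) (hy0 : 0 ≤ y)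
    (d : Nat) (hdl : x.toNat + 1 + d < arr.length)
    (hcol : ∀ j, j ≤ d → y.toNat < (pvRow arr (x.toNat + 1 + j)).length)
    (hdots : ∀ j, j < d → pvCellAt arr (x.toNat + 1 + j) y.toNat = ".")
    (hblk : pvCellAt arr (x.toNat + 1 + d) y.toNat ≠ ".") :
    pvLoopA arr 1 0 (pvFuel arr) x y = pvAltBody arr x y 1 0 := by
  have hAcells : ∀ j : Nat, j ≤ d →
      pvCell arr (x + ((j : Int) + 1) * 1) (y + ((j : Int) + 1) * 0) =
        some (pvCellAt arr (x.toNat + 1 + j) y.toNat) := by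
    intro j hj
    have ex : x + ((j : Int) + 1) * 1 = ((x.toNat + 1 + j : Nat) : Int) := by push_cast; omega
    have ey : y + ((j : Int) + 1) * 0 = ((y.toNat : Nat) : Int) := by omega
    rw [ex, ey]
    exact pvCell_natCast arr _ _ (by omega) (hcol j hj)
  have hA := pvLoopA_blocked arr 1 0 _ hblk d x y (pvFuel arr)
    (by unfold pvFuel; omega)
    (fun j hj => by rw [hAcells j (by omega)]; rw [hdots j hj])
    (hAcells d le_rfl)
  have hray : pvRayOf arr x y 1 0 = pvRayV y (arr.drop (x.toNat + 1)) := by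
    unfold pvRayOf
    rw [if_pos (by norm_num), if_pos rfl, PySem.List.slice_from arr (by omega)]
    congr 2
    omega
  have hy : y = ((y.toNat : Nat) : Int) := by omega
  have hget : ∀ j : Nat, j ≤ d →
      (pvRayOf arr x y 1 0)[j]? = some (pvCellAt arr (x.toNat + 1 + j) y.toNat) := by
    intro j hj
    rw [hray, hy, pvRayV_get y.toNat (arr.drop (x.toNat + 1)) j
      (fun i hi => by rw [pvRow_drop]; exact hcol i (by omega))
      (by simp; omega)]
    rw [pvCellAt_drop, Int.toNat_natCast]
  have hB := pvAltBody_eval arr x y 1 0 d _ hblk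
    (fun j hj => by rw [hget j (by omega)]; rw [hdots j hj]) (hget d le_rfl)
  rw [hA, hB]

-- direction up (dx -1, dy 0)
lemma dir_up (arr : List (List String)) (x y : Int) (hx0 : 0 ≤ x) (hy0 : 0 ≤ y)
    (hxl : x < (arr.length : Int))
    (d : Nat) (hdx : d < x.toNat)
    (hcol : ∀ j, j ≤ d → y.toNat < (pvRow arr (x.toNat - 1 - j)).length)
    (hdots : ∀ j, j < d → pvCellAt arr (x.toNat - 1 - j) y.toNat = ".")
    (hblk : pvCellAt arr (x.toNat - 1 - d) y.toNat ≠ ".") :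
    pvLoopA arr (-1) 0 (pvFuel arr) x y = pvAltBody arr x y (-1) 0 := by
  have hAcells : ∀ j : Nat, j ≤ d →
      pvCell arr (x + ((j : Int) + 1) * (-1)) (y + ((j : Int) + 1) * 0) =
        some (pvCellAt arr (x.toNat - 1 - j) y.toNat) := by
    intro j hj
    have ex : x + ((j : Int) + 1) * (-1) = ((x.toNat - 1 - j : Nat) : Int) := by push_cast [show j ≤ x.toNat - 1 by omega]; omega
    have ey : y + ((j : Int) + 1) * 0 = ((y.toNat : Nat) : Int) := by omega
    rw [ex, ey]
    exact pvCell_natCast arr _ _ (by omega) (hcol j hj)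
  have hA := pvLoopA_blocked arr (-1) 0 _ hblk d x y (pvFuel arr)
    (by unfold pvFuel; omega)
    (fun j hj => by rw [hAcells j (by omega)]; rw [hdots j hj])
    (hAcells d le_rfl)
  have hray : pvRayOf arr x y (-1) 0 = pvRayV y ((arr.take x.toNat).reverse) := by
    unfold pvRayOf
    rw [if_pos (by norm_num), if_neg (by norm_num), PySem.List.slice_to arr (by omega)]
  have hy : y = ((y.toNat : Nat) : Int) := by omega
  have hget : ∀ j : Nat, j ≤ d →
      (pvRayOf arr x y (-1) 0)[j]? = some (pvCellAt arr (x.toNat - 1 - j) y.toNat) := by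
    intro j hj
    rw [hray, hy, pvRayV_get y.toNat ((arr.take x.toNat).reverse) j
      (fun i hi => by
        rw [pvRow_take_rev arr x.toNat i (by omega) (by omega)]
        exact hcol i (by omega))
      (by simp; omega)]
    rw [pvCellAt_take_rev arr x.toNat j y.toNat (by omega) (by omega), Int.toNat_natCast]
  have hB := pvAltBody_eval arr x y (-1) 0 d _ hblk
    (fun j hj => by rw [hget j (by omega)]; rw [hdots j hj]) (hget d le_rfl)
  rw [hA, hB]

-- direction right (dx 0, dy 1)
lemma dir_right (arr : List (List String)) (x y : Int) (hx0 : 0 ≤ x) (hy0 : 0 ≤ y)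
    (hxl : x < (arr.length : Int))
    (d : Nat) (hdl : y.toNat + 1 + d < (pvRow arr x.toNat).length)
    (hdots : ∀ j, j < d → pvCellAt arr x.toNat (y.toNat + 1 + j) = ".")
    (hblk : pvCellAt arr x.toNat (y.toNat + 1 + d) ≠ ".") :
    pvLoopA arr 0 1 (pvFuel arr) x y = pvAltBody arr x y 0 1 := by
  have hAcells : ∀ j : Nat, j ≤ d →
      pvCell arr (x + ((j : Int) + 1) * 0) (y + ((j : Int) + 1) * 1) =
        some (pvCellAt arr x.toNat (y.toNat + 1 + j)) := by
    intro j hj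
    have ex : x + ((j : Int) + 1) * 0 = ((x.toNat : Nat) : Int) := by omega
    have ey : y + ((j : Int) + 1) * 1 = ((y.toNat + 1 + j : Nat) : Int) := by push_cast; omega
    rw [ex, ey]
    exact pvCell_natCast arr _ _ (by omega) (by omega)
  have hA := pvLoopA_blocked arr 0 1 _ hblk d x y (pvFuel arr)
    (by have := rowLen_le_fold arr x.toNat (by omega); unfold pvFuel; omega)
    (fun j hj => by rw [hAcells j (by omega)]; rw [hdots j hj])
    (hAcells d le_rfl)
  have hrow : (PySem.List.pyGet? arr x).getD [] = pvRow arr x.toNat := by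
    rw [show x = ((x.toNat : Nat) : Int) by omega, PySem.List.pyGet?_natCast, Int.toNat_natCast, pvRow]
  have hray : pvRayOf arr x y 0 1 = (pvRow arr x.toNat).drop (y.toNat + 1) := by
    unfold pvRayOf
    rw [if_neg (by norm_num)]
    simp only [hrow]
    rw [if_pos trivial, PySem.List.slice_from _ (by omega)]
    congr 1
    omega
  have hget : ∀ j : Nat, j ≤ d →
      (pvRayOf arr x y 0 1)[j]? = some (pvCellAt arr x.toNat (y.toNat + 1 + j)) := by
    intro j hj
    rw [hray, List.getElem?_drop, pvCellAt,
      List.getElem?_eq_getElem (by omega : y.toNat + 1 + j < (pvRow arr x.toNat).length)]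
    simp
  have hB := pvAltBody_eval arr x y 0 1 d _ hblk
    (fun j hj => by rw [hget j (by omega)]; rw [hdots j hj]) (hget d le_rfl)
  rw [hA, hB]

-- direction left (dx 0, dy -1)
lemma dir_left (arr : List (List String)) (x y : Int) (hx0 : 0 ≤ x) (hy0 : 0 ≤ y)
    (hxl : x < (arr.length : Int)) (hyl : y < ((pvRow arr x.toNat).length : Int))
    (d : Nat) (hdy : d < y.toNat)
    (hdots : ∀ j, j < d → pvCellAt arr x.toNat (y.toNat - 1 - j) = ".")
    (hblk : pvCellAt arr x.toNat (y.toNat - 1 - d) ≠ ".") :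
    pvLoopA arr 0 (-1) (pvFuel arr) x y = pvAltBody arr x y 0 (-1) := by
  have hAcells : ∀ j : Nat, j ≤ d →
      pvCell arr (x + ((j : Int) + 1) * 0) (y + ((j : Int) + 1) * (-1)) =
        some (pvCellAt arr x.toNat (y.toNat - 1 - j)) := by
    intro j hj
    have ex : x + ((j : Int) + 1) * 0 = ((x.toNat : Nat) : Int) := by omega
    have ey : y + ((j : Int) + 1) * (-1) = ((y.toNat - 1 - j : Nat) : Int) := by push_cast [show j ≤ y.toNat - 1 by omega]; omega
    rw [ex, ey]
    exact pvCell_natCast arr _ _ (by omega) (by omega)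
  have hA := pvLoopA_blocked arr 0 (-1) _ hblk d x y (pvFuel arr)
    (by have := rowLen_le_fold arr x.toNat (by omega); unfold pvFuel; omega)
    (fun j hj => by rw [hAcells j (by omega)]; rw [hdots j hj])
    (hAcells d le_rfl)
  have hrow : (PySem.List.pyGet? arr x).getD [] = pvRow arr x.toNat := by
    rw [show x = ((x.toNat : Nat) : Int) by omega, PySem.List.pyGet?_natCast, Int.toNat_natCast, pvRow]
  have hray : pvRayOf arr x y 0 (-1) = ((pvRow arr x.toNat).take y.toNat).reverse := by
    unfold pvRayOf
    rw [if_neg (by norm_num)]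
    simp only [hrow]
    rw [if_neg (by norm_num : ¬((-1:Int) = 1)), PySem.List.slice_to _ (by omega)]
  have hget : ∀ j : Nat, j ≤ d →
      (pvRayOf arr x y 0 (-1))[j]? = some (pvCellAt arr x.toNat (y.toNat - 1 - j)) := by
    intro j hj
    have hyr : y.toNat ≤ (pvRow arr x.toNat).length := by omega
    have hlen : ((pvRow arr x.toNat).take y.toNat).length = y.toNat := by simp [hyr]
    rw [hray, List.getElem?_reverse (by omega : j < ((pvRow arr x.toNat).take y.toNat).length),
      hlen, List.getElem?_take_of_lt (by omega : y.toNat - 1 - j < y.toNat)]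
    simp [pvCellAt, List.getElem?_eq_getElem (show y.toNat - 1 - j < (pvRow arr x.toNat).length by omega)]
  have hB := pvAltBody_eval arr x y 0 (-1) d _ hblk
    (fun j hj => by rw [hget j (by omega)]; rw [hdots j hj]) (hget d le_rfl)
  rw [hA, hB]

theorem target_move_spec : Claim_equal_target_move := by
  intro arr x y n _ hpre
  show target_move arr x y n = target_move_alt arr x y n
  rcases hpre with hdot | ⟨hx0, hxl, hy0, hyl, hn0, hn4, hbl⟩
  · simp [target_move, target_move_alt, hdot]
  · by_cases hdot : pvCell arr x y = some "."
    · simp [target_move, target_move_alt, hdot]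
    · unfold target_move target_move_alt
      rw [if_neg hdot, if_neg hdot]
      have hn : n = 0 ∨ n = 1 ∨ n = 2 ∨ n = 3 ∨ n = -4 ∨ n = -3 ∨ n = -2 ∨ n = -1 := by omega
      rcases hn with rfl | rfl | rfl | rfl | rfl | rfl | rfl | rfl
      · rw [show (PySem.List.pyGet? [(1 : Int), -1, 0, 0] 0).getD 0 = 1 from by decide,
          show (PySem.List.pyGet? [(0 : Int), 0, 1, -1] 0).getD 0 = 0 from by decide]
        unfold pvFirstBlock at hbl
        rw [if_pos (Or.inl rfl)] at hbl
        obtain ⟨d, hdl, hcol, hdots, hblk⟩ := hbl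
        exact dir_down arr x y hx0 hy0 d hdl hcol hdots hblk
      · rw [show (PySem.List.pyGet? [(1 : Int), -1, 0, 0] 1).getD 0 = -1 from by decide,
          show (PySem.List.pyGet? [(0 : Int), 0, 1, -1] 1).getD 0 = 0 from by decide]
        unfold pvFirstBlock at hbl
        rw [if_neg (by norm_num), if_pos (Or.inl rfl)] at hbl
        obtain ⟨d, hdx, hcol, hdots, hblk⟩ := hbl
        exact dir_up arr x y hx0 hy0 hxl d hdx hcol hdots hblk
      · rw [show (PySem.List.pyGet? [(1 : Int), -1, 0, 0] 2).getD 0 = 0 from by decide,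
          show (PySem.List.pyGet? [(0 : Int), 0, 1, -1] 2).getD 0 = 1 from by decide]
        unfold pvFirstBlock at hbl
        rw [if_neg (by norm_num), if_neg (by norm_num), if_pos (Or.inl rfl)] at hbl
        obtain ⟨d, hdl, hdots, hblk⟩ := hbl
        exact dir_right arr x y hx0 hy0 hxl d hdl hdots hblk
      · rw [show (PySem.List.pyGet? [(1 : Int), -1, 0, 0] 3).getD 0 = 0 from by decide,
          show (PySem.List.pyGet? [(0 : Int), 0, 1, -1] 3).getD 0 = -1 from by decide]
        unfold pvFirstBlock at hbl
        rw [if_neg (by norm_num), if_neg (by norm_num), if_neg (by norm_num)] at hbl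
        obtain ⟨d, hdy, hdots, hblk⟩ := hbl
        exact dir_left arr x y hx0 hy0 hxl hyl d hdy hdots hblk
      · rw [show (PySem.List.pyGet? [(1 : Int), -1, 0, 0] (-4)).getD 0 = 1 from by decide,
          show (PySem.List.pyGet? [(0 : Int), 0, 1, -1] (-4)).getD 0 = 0 from by decide]
        unfold pvFirstBlock at hbl
        rw [if_pos (Or.inr rfl)] at hbl
        obtain ⟨d, hdl, hcol, hdots, hblk⟩ := hbl
        exact dir_down arr x y hx0 hy0 d hdl hcol hdots hblk
      · rw [show (PySem.List.pyGet? [(1 : Int), -1, 0, 0] (-3)).getD 0 = -1 from by decide,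
          show (PySem.List.pyGet? [(0 : Int), 0, 1, -1] (-3)).getD 0 = 0 from by decide]
        unfold pvFirstBlock at hbl
        rw [if_neg (by norm_num), if_pos (Or.inr rfl)] at hbl
        obtain ⟨d, hdx, hcol, hdots, hblk⟩ := hbl
        exact dir_up arr x y hx0 hy0 hxl d hdx hcol hdots hblk
      · rw [show (PySem.List.pyGet? [(1 : Int), -1, 0, 0] (-2)).getD 0 = 0 from by decide,
          show (PySem.List.pyGet? [(0 : Int), 0, 1, -1] (-2)).getD 0 = 1 from by decide]
        unfold pvFirstBlock at hbl
        rw [if_neg (by norm_num), if_neg (by norm_num), if_pos (Or.inr rfl)] at hbl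
        obtain ⟨d, hdl, hdots, hblk⟩ := hbl
        exact dir_right arr x y hx0 hy0 hxl d hdl hdots hblk
      · rw [show (PySem.List.pyGet? [(1 : Int), -1, 0, 0] (-1)).getD 0 = 0 from by decide,
          show (PySem.List.pyGet? [(0 : Int), 0, 1, -1] (-1)).getD 0 = -1 from by decide]
        unfold pvFirstBlock at hbl
        rw [if_neg (by norm_num), if_neg (by norm_num), if_neg (by norm_num)] at hbl
        obtain ⟨d, hdy, hdots, hblk⟩ := hbl
        exact dir_left arr x y hx0 hy0 hxl hyl d hdy hdots hblk
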